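-- pv_equiv track=rewrite | github.com/osmancan-sari/Lab-Sessions | Lab_6/mirror_encoding.py | mirror_encode
-- ===== SOURCE A (Python) =====
-- def mirror_encode(word):
--     left_side = ""
--     right_side = ""
--     word_len = len(word)
--     if word_len <= 1:
--         return ""
--     else:
--         if word[0] != word[-1]:
--             left_side += word[-1] + word[0]
--             right_side += word[0] + word[-1]
--
--
--     return left_side + mirror_encode(word[1:-1]) + right_side
-- ===== SOURCE B (Python) =====
-- def mirror_encode(word):
--     left = []
--     right = []
--     i, j = 0, len(word) - 1
--     while i < j:
--         if word[i] != word[j]: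
--             left.append(word[j] + word[i])
--             right.append(word[i] + word[j])
--         i += 1
--         j -= 1
--     return "".join(left) + "".join(right[::-1])
-- ===== Notes on version B (the rewrite author's own statement) =====
-- stated objective: faster
-- what changed: Replaced A's recursion that copies word[1:-1] at every level (O(n^2)) by a single two-pointer pass that collects the unequal outer pairs into left/right group lists and joins them once (O(n)).
import Mathlib
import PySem

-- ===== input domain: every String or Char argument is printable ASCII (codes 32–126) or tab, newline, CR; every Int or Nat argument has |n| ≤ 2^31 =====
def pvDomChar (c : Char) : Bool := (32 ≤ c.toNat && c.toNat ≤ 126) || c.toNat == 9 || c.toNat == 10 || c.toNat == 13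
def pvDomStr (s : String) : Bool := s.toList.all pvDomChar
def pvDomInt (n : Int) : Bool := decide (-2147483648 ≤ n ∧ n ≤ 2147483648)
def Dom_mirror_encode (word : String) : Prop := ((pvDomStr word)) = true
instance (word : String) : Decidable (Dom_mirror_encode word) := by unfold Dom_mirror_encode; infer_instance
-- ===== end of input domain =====

-- B replaces A's O(n^2) recursion (which re-slices word[1:-1] each level) by one O(n) two-pointer pass.


-- ===== PORT A =====
-- A peels the string from both ends: word[0] is the head, word[-1] is getLast!,
-- word[1:-1] is (tail).dropLast; on the first two patterns len(word) <= 1 and A returns "".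
def mirrorA : List Char → List Char
  | [] => []
  | [_] => []
  | c :: d :: t =>
    let rest := d :: t
    let last := rest.getLast!
    let left_side := if c ≠ last then [last, c] else []
    let right_side := if c ≠ last then [c, last] else []
    left_side ++ mirrorA rest.dropLast ++ right_side
termination_by l => l.length
decreasing_by simp [List.length_dropLast]

def mirror_encode (word : String) : String :=
  String.ofList (mirrorA word.toList)

-- ===== PORT B =====
-- two-pointer loop: i from the front, j from the back; left/right collect the
-- two-char groups in order, rights are reversed groupwise and joined at the end.
def altGo (cs : List Char) (i j : Nat) (left right : List (List Char)) : List Char :=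
  if i < j then
    if cs.getD i ' ' ≠ cs.getD j ' ' then
      altGo cs (i + 1) (j - 1)
        (left ++ [[cs.getD j ' ', cs.getD i ' ']])
        (right ++ [[cs.getD i ' ', cs.getD j ' ']])
    else
      altGo cs (i + 1) (j - 1) left right
  else
    left.flatten ++ right.reverse.flatten
termination_by j - i
decreasing_by all_goals omega

def mirror_encode_alt (word : String) : String :=
  let cs := word.toList
  String.ofList (altGo cs 0 (cs.length - 1) [] [])

-- ===== PRECONDITION & SPEC =====
def Spec_mirror_encode (word : String) (out : String) : Prop := out = mirror_encode_alt word
instance (word : String) (out : String) : Decidable (Spec_mirror_encode word out) := by unfold Spec_mirror_encode; infer_instance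

-- ===== CLAIM (what is proved, stated in full; the proofs are below) =====
def Claim_equal_mirror_encode : Prop := ∀ (word : String), Dom_mirror_encode word → Spec_mirror_encode word (mirror_encode word)

-- ===== LEMMAS AND PROOFS =====

lemma altGo_lt (cs : List Char) (i j : Nat) (L R : List (List Char)) (h : i < j) :
    altGo cs i j L R =
      if cs.getD i ' ' ≠ cs.getD j ' ' then
        altGo cs (i + 1) (j - 1)
          (L ++ [[cs.getD j ' ', cs.getD i ' ']])
          (R ++ [[cs.getD i ' ', cs.getD j ' ']])
      else altGo cs (i + 1) (j - 1) L R := by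
  rw [altGo]; simp [h]

lemma altGo_ge (cs : List Char) (i j : Nat) (L R : List (List Char)) (h : ¬ i < j) :
    altGo cs i j L R = L.flatten ++ R.reverse.flatten := by
  rw [altGo]; simp [h]

lemma mirrorA_short (l : List Char) (h : l.length ≤ 1) : mirrorA l = [] := by
  match l with
  | [] => rw [mirrorA]
  | [_] => rw [mirrorA]
  | _ :: _ :: _ => simp at h

lemma mirrorA_cons₂ (c d : Char) (t : List Char) :
    mirrorA (c :: d :: t) =
      (if c ≠ (d :: t).getLast! then [(d :: t).getLast!, c] else [])
        ++ mirrorA (d :: t).dropLast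
        ++ (if c ≠ (d :: t).getLast! then [c, (d :: t).getLast!] else []) := by
  rw [mirrorA]

lemma altGo_acc (m : Nat) : ∀ (cs : List Char) (i j : Nat), j - i = m →
    ∀ (L R : List (List Char)),
    altGo cs i j L R = L.flatten ++ altGo cs i j [] [] ++ R.reverse.flatten := by
  induction m using Nat.strong_induction_on with
  | _ m ih =>
    intro cs i j hm L R
    by_cases hij : i < j
    · have hm' : (j - 1) - (i + 1) < m := by omega
      rw [altGo_lt cs i j L R hij, altGo_lt cs i j [] [] hij]
      by_cases hc : cs.getD i ' ' ≠ cs.getD j ' '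
      · rw [if_pos hc, if_pos hc]
        rw [ih _ hm' cs (i+1) (j-1) rfl,
          ih _ hm' cs (i+1) (j-1) rfl ([] ++ [[cs.getD j ' ', cs.getD i ' ']]) ([] ++ [[cs.getD i ' ', cs.getD j ' ']])]
        simp
      · rw [if_neg hc, if_neg hc]
        rw [ih _ hm' cs (i+1) (j-1) rfl L R]
    · rw [altGo_ge cs i j L R hij, altGo_ge cs i j [] [] hij]
      simp

lemma subl_struct (cs : List Char) (i j : Nat) (hij : i < j) (hj : j < cs.length) :
    (cs.drop i).take (j + 1 - i)
      = cs[i] :: (((cs.drop (i+1)).take ((j-1) + 1 - (i+1))) ++ [cs[j]]) := by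
  have hi : i < cs.length := by omega
  rw [List.drop_eq_getElem_cons hi]
  have h1 : j + 1 - i = (j - i - 1) + 1 + 1 := by omega
  rw [h1, List.take_succ_cons]
  congr 1
  have h2 : (j - i - 1) + 1 = ((j-1) + 1 - (i+1)) + 1 := by omega
  rw [h2, List.take_add_one]
  congr 1
  have h3 : i + 1 + ((j-1) + 1 - (i+1)) = j := by omega
  rw [List.getElem?_drop, h3, List.getElem?_eq_getElem hj]
  rfl

lemma altGo_eq (m : Nat) : ∀ (cs : List Char) (i j : Nat), j - i = m → j < cs.length →
    altGo cs i j [] [] = mirrorA ((cs.drop i).take (j + 1 - i)) := by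
  induction m using Nat.strong_induction_on with
  | _ m ih =>
    intro cs i j hm hj
    by_cases hij : i < j
    · have hm' : (j - 1) - (i + 1) < m := by omega
      have hgi : cs.getD i ' ' = cs[i] := List.getD_eq_getElem _ _ (by omega)
      have hgj : cs.getD j ' ' = cs[j] := List.getD_eq_getElem _ _ hj
      have hrec := ih _ hm' cs (i+1) (j-1) rfl (by omega)
      rw [subl_struct cs i j hij hj]
      rw [altGo_lt cs i j [] [] hij]
      simp only [hgi, hgj]
      obtain ⟨d, t, ht⟩ : ∃ d t, (((cs.drop (i+1)).take ((j-1) + 1 - (i+1))) ++ [cs[j]]) = d :: t := by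
        cases h : (((cs.drop (i+1)).take ((j-1) + 1 - (i+1))) ++ [cs[j]]) with
        | nil => simp at h
        | cons d t => exact ⟨d, t, rfl⟩
      rw [ht, mirrorA_cons₂, ← ht]
      have hlast : (((cs.drop (i+1)).take ((j-1) + 1 - (i+1))) ++ [cs[j]]).getLast! = cs[j] :=
        List.getLast!_of_getLast? List.getLast?_concat
      rw [hlast, List.dropLast_concat]
      by_cases hc : cs[i] ≠ cs[j]
      · rw [if_pos hc, if_pos hc, if_pos hc]
        rw [altGo_acc ((j-1) - (i+1)) cs (i+1) (j-1) rfl, hrec]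
        simp
      · rw [if_neg hc, if_neg hc, if_neg hc]
        rw [altGo_acc ((j-1) - (i+1)) cs (i+1) (j-1) rfl, hrec]
        simp
    · rw [altGo_ge cs i j [] [] hij]
      rw [mirrorA_short]
      · simp
      · simp; omega

lemma main_eq (cs : List Char) : mirrorA cs = altGo cs 0 (cs.length - 1) [] [] := by
  cases cs with
  | nil =>
    rw [altGo_ge _ _ _ _ _ (by simp), mirrorA_short _ (by simp)]
    simp
  | cons c t =>
    rw [altGo_eq ((c :: t).length - 1) (c :: t) 0 ((c :: t).length - 1) rfl (by simp)]
    simp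

-- ===== VERDICT (by name: the statement is the Claim_ definition above) =====
theorem mirror_encode_spec : Claim_equal_mirror_encode := by
  intro word _
  unfold Spec_mirror_encode mirror_encode mirror_encode_alt
  rw [main_eq]
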